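-- pv_equiv track=rewrite | github.com/airdamien/seedBuddy | seed_master_pcb.py | _generate_text_elements
-- ===== SOURCE A (Python) =====
-- def _generate_text_elements(base64_data: str, size: int) -> str:
--     """Generate SVG text elements for base64 data."""
--     chunk_size = 32
--     chunks = [base64_data[i:i+chunk_size] for i in range(0, len(base64_data), chunk_size)]
--
--     text_elements = []
--     start_y = int(size * 0.55)
--     line_height = 40
--
--     for i, chunk in enumerate(chunks):
--         if start_y + i * line_height > size - 50:
--             break
--         text_elements.append(f'<text x="{size//2}" y="{start_y + i * line_height}" text-anchor="middle" class="text">{chunk}</text>')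
--
--     return '\n  '.join(text_elements)
-- ===== SOURCE B (Python) =====
-- def _generate_text_elements(base64_data: str, size: int) -> str:
--     """Generate SVG text elements for base64 data (closed-form line count, no break)."""
--     start_y = int(size * 0.55)
--     limit = size - 50
--     max_lines = 0 if start_y > limit else (limit - start_y) // 40 + 1
--     total_chunks = (len(base64_data) + 31) // 32
--     n = min(max_lines, total_chunks)
--     x = size // 2
--     lines = [
--         f'<text x="{x}" y="{start_y + i * 40}" text-anchor="middle" class="text">{base64_data[i*32:i*32+32]}</text>'
--         for i in range(n)
--     ]
--     return '\n  '.join(lines)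
-- ===== Notes on version B (the rewrite author's own statement) =====
-- stated objective: simpler
-- what changed: Replaces the enumerate loop with a conditional break by a closed-form count of how many lines fit (max_lines = (size-50-start_y)//40 + 1, or 0), slices exactly that many 32-char chunks in one comprehension, and hoists x = size//2 out of the loop.
import Mathlib
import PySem

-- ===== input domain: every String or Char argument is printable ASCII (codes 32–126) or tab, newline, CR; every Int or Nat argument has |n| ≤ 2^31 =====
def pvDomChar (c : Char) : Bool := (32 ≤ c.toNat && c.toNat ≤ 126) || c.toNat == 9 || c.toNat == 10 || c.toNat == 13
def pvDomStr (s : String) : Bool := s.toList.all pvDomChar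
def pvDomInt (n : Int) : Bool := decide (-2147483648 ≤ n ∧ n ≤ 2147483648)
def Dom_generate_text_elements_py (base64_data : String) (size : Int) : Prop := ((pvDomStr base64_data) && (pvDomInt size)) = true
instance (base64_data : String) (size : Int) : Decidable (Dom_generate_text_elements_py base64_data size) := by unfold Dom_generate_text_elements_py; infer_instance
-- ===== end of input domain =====

-- B replaces A's per-chunk early-break loop by a closed-form count of the lines that fit,
-- then builds exactly that many text elements in one comprehension (objective: simpler).
-- int(size*0.55) is ported as an exact integer truncation, valid on the domain |size| ≤ 2^31.


-- int(size*0.55): exact integer form of Python's float expression, verified exhaustively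
-- against CPython over the float-critical residues for all |size| ≤ 2^31 (truncation toward zero).
def pvTrunc055 (size : Int) : Int :=
  if 0 ≤ size then PySem.Int.floordiv (11 * size) 20
  else -(PySem.Int.floordiv (11 * (-size)) 20)

-- ===== PORT A =====
-- the for-loop with its `break`, index i from enumerate
def pvLoopA (size start_y line_height : Int) : Nat → List String → List String
  | _, [] => []
  | i, chunk :: rest =>
    if start_y + (i : Int) * line_height > size - 50 then []
    else ("<text x=\"" ++ PySem.Int.toStr (PySem.Int.floordiv size 2) ++ "\" y=\"" ++
            PySem.Int.toStr (start_y + (i : Int) * line_height) ++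
            "\" text-anchor=\"middle\" class=\"text\">" ++ chunk ++ "</text>")
           :: pvLoopA size start_y line_height (i + 1) rest

def generate_text_elements_py (base64_data : String) (size : Int) : String :=
  let chunk_size : Int := 32
  let chunks := (PySem.List.pyRange 0 (PySem.Str.len base64_data) chunk_size).map
      (fun i => PySem.Str.slice base64_data (some i) (some (i + chunk_size)))
  let start_y := pvTrunc055 size
  let line_height : Int := 40
  let text_elements := pvLoopA size start_y line_height 0 chunks
  PySem.Str.join "\n  " text_elements

-- ===== PORT B =====
def generate_text_elements_py_alt (base64_data : String) (size : Int) : String :=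
  let start_y := pvTrunc055 size
  let limit := size - 50
  let max_lines := if start_y > limit then 0 else PySem.Int.floordiv (limit - start_y) 40 + 1
  let total_chunks := PySem.Int.floordiv (PySem.Str.len base64_data + 31) 32
  let n := min max_lines total_chunks
  let x := PySem.Int.floordiv size 2
  let lines := (PySem.List.pyRange 0 n 1).map (fun i =>
    "<text x=\"" ++ PySem.Int.toStr x ++ "\" y=\"" ++ PySem.Int.toStr (start_y + i * 40) ++
      "\" text-anchor=\"middle\" class=\"text\">" ++
      PySem.Str.slice base64_data (some (i * 32)) (some (i * 32 + 32)) ++ "</text>")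
  PySem.Str.join "\n  " lines

-- ===== PRECONDITION & SPEC =====
def Spec_generate_text_elements_py (base64_data : String) (size : Int) (out : String) : Prop := out = generate_text_elements_py_alt base64_data size
instance (base64_data : String) (size : Int) (out : String) : Decidable (Spec_generate_text_elements_py base64_data size out) := by unfold Spec_generate_text_elements_py; infer_instance

-- ===== CLAIM (what is proved, stated in full; the proofs are below) =====
def Claim_equal_generate_text_elements_py : Prop := ∀ (base64_data : String) (size : Int), Dom_generate_text_elements_py base64_data size → Spec_generate_text_elements_py base64_data size (generate_text_elements_py base64_data size)

-- ===== LEMMAS AND PROOFS =====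

-- the break condition is monotone in i: it fires exactly for i ≥ M (the closed-form line bound)
theorem pvCond_iff (size sy : Int) (i : Nat) :
    (sy + (i : Int) * 40 > size - 50) ↔
      (if sy > size - 50 then (0:Int) else PySem.Int.floordiv (size - 50 - sy) 40 + 1) ≤ (i : Int) := by
  rw [PySem.Int.floordiv_eq_ediv_of_pos (by norm_num : (0:Int) < 40)]
  split_ifs with h <;> omega

-- A's loop from position i is the first (M - i) elements, rendered
theorem pvLoopA_eq (size sy : Int) (M : Int)
    (hM : M = if sy > size - 50 then (0:Int) else PySem.Int.floordiv (size - 50 - sy) 40 + 1)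
    (cs : List String) : ∀ (i : Nat),
    pvLoopA size sy 40 i cs =
      (List.range (min (M.toNat - i) cs.length)).map (fun j =>
        "<text x=\"" ++ PySem.Int.toStr (PySem.Int.floordiv size 2) ++ "\" y=\"" ++
          PySem.Int.toStr (sy + ((i + j : Nat) : Int) * 40) ++
          "\" text-anchor=\"middle\" class=\"text\">" ++ cs.getD j "" ++ "</text>") := by
  have hM0 : 0 ≤ M := by
    rw [hM, PySem.Int.floordiv_eq_ediv_of_pos (by norm_num : (0:Int) < 40)]
    split_ifs with h <;> omega
  induction cs with
  | nil => intro i; simp [pvLoopA]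
  | cons c cs ih =>
    intro i
    rw [pvLoopA]
    by_cases hc : sy + (i : Int) * 40 > size - 50
    · have h1 : M ≤ (i : Int) := by rw [hM]; exact (pvCond_iff size sy i).mp hc
      have h2 : min (M.toNat - i) (c :: cs).length = 0 := by
        have : M.toNat - i = 0 := by omega
        simp [this]
      simp [hc]
      omega
    · have hni : ¬ ((if sy > size - 50 then (0:Int) else PySem.Int.floordiv (size - 50 - sy) 40 + 1) ≤ (i : Int)) :=
        fun hh => hc ((pvCond_iff size sy i).mpr hh)
      have hlt : (i : Int) < M := by rw [hM]; by_contra h2; exact hni (by omega)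
      have hkey : min (M.toNat - i) (c :: cs).length = min (M.toNat - (i+1)) cs.length + 1 := by
        simp only [List.length_cons]; omega
      rw [if_neg hc, ih (i + 1), hkey, List.range_succ_eq_map]
      simp only [List.map_cons, List.map_map]
      congr 1
      apply List.map_congr_left
      intro j hj
      have h1 : i + 1 + j = i + (j + 1) := by omega
      simp only [Function.comp, Nat.succ_eq_add_one, List.getD_cons_succ, h1]

-- the number of 32-chunks of a length-L string is (L+31)/32
theorem pvChunkCount (L : Nat) :
    (if (0:Int) < (L:Int) then (((L:Int) - 0 + 32 - 1) / 32).toNat else 0) = (L + 31) / 32 := by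
  split_ifs with h
  · have : ((L:Int) - 0 + 32 - 1) = ((L + 31 : Nat) : Int) := by push_cast; ring
    rw [this]
    rw [show ((32:Int)) = ((32:Nat):Int) from rfl, ← Int.natCast_div, Int.toNat_natCast]
  · have : L = 0 := by omega
    simp [this]

theorem generate_text_elements_py_eq (base64_data : String) (size : Int) :
    generate_text_elements_py base64_data size = generate_text_elements_py_alt base64_data size := by
  unfold generate_text_elements_py generate_text_elements_py_alt
  set sy := pvTrunc055 size with hsy
  set M : Int := if sy > size - 50 then (0:Int) else PySem.Int.floordiv (size - 50 - sy) 40 + 1 with hMdef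
  have hM0 : 0 ≤ M := by
    rw [hMdef, PySem.Int.floordiv_eq_ediv_of_pos (by norm_num : (0:Int) < 40)]
    split_ifs with h <;> omega
  -- A's chunk list as a map over List.range
  have hlen : PySem.Str.len base64_data = ((base64_data.toList.length : Nat) : Int) := by
    simp [PySem.Str.len_eq]
  set L : Nat := base64_data.toList.length with hL
  have hKA : PySem.List.pyRange 0 (PySem.Str.len base64_data) 32 =
      (List.range ((L + 31) / 32)).map (fun k : Nat => (0 : Int) + 32 * (k : Int)) := by
    rw [hlen, PySem.List.pyRange_of_pos _ _ (by norm_num : (0:Int) < 32)]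
    rw [pvChunkCount L]
  simp only [hKA, List.map_map]
  rw [pvLoopA_eq size sy M hMdef _ 0]
  -- B's range
  have hn : min M (PySem.Int.floordiv (PySem.Str.len base64_data + 31) 32) =
      ((min M.toNat ((L + 31) / 32) : Nat) : Int) := by
    rw [hlen]
    rw [show ((L : Int) + 31) = (((L + 31 : Nat)) : Int) by push_cast; ring]
    rw [show ((32:Int)) = ((32:Nat):Int) from rfl, PySem.Int.floordiv_natCast]
    omega
  simp only [← hMdef, hn, PySem.List.pyRange_zero_natCast, List.map_map]
  simp only [List.length_map, List.length_range, Nat.sub_zero]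
  apply congrArg
  apply List.map_congr_left
  intro j hj
  simp only [List.mem_range] at hj
  have hjK : j < (L + 31) / 32 := by omega
  simp only [Function.comp_apply]
  rw [PySem.List.getD_map_range _ _ _ _ hjK]
  simp only [Function.comp_apply]
  have e2 : (0 : Int) + 32 * (j:Int) = (j:Int) * 32 := by ring
  rw [e2]
  simp

-- ===== VERDICT (by name: the statement is the Claim_ definition above) =====
theorem generate_text_elements_py_spec : Claim_equal_generate_text_elements_py := by
  intro base64_data size _
  exact generate_text_elements_py_eq base64_data size
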